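-- pv_equiv track=rewrite | github.com/orinadam/calander_optimization | server/warning_messages.py | verify_id
-- ===== SOURCE A (Python) =====
-- ID_IS_NOT_A_NUMBER = " שגיאה: הערך {value} אינו מספר תעודת זהות תקין."
--
-- ID_EMPTY = "שגיאה: שדה תעודת זהות ריק."
--
-- ID_INVALID_CHECK_DIGIT = "שגיאה: הערך {value} אינו מספר תעודת זהות תקין. טעות בספרת הביקורת."
--
-- def verify_id(id_number):
--     """
--     checks if a given id number is valid
--     :param id_number: the id number to check
--     :return: an empty string if id_number is valid, otherwise a string detailing the error
--     """
--     if not id_number: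
--         return ID_EMPTY
--     try:
--         id_number_str = str(int(id_number)).zfill(9)
--     except ValueError:
--         return ID_IS_NOT_A_NUMBER.format(value=id_number.__repr__())
--
--     orig_value = id_number_str
--
--     check_digit = int(id_number_str[-1])
--     id_number_str = id_number_str[:-1]
--
--     odd_placed_digits = [int(i) for i in id_number_str[::2]]
--     even_placed_digits = [int(i) for i in id_number_str[1::2]]
--
--     values = odd_placed_digits + [2*i for i in even_placed_digits]
--     values = "".join((str(i) for i in values))
--     expected_check = 10 - sum([int(i) for i in values]) % 10
--
--     if check_digit != expected_check:
--         return ID_INVALID_CHECK_DIGIT.format(value=orig_value.__repr__())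
--
--     return ""
-- ===== SOURCE B (Python) =====
-- ID_IS_NOT_A_NUMBER = " שגיאה: הערך {value} אינו מספר תעודת זהות תקין."
--
-- ID_EMPTY = "שגיאה: שדה תעודת זהות ריק."
--
-- ID_INVALID_CHECK_DIGIT = "שגיאה: הערך {value} אינו מספר תעודת זהות תקין. טעות בספרת הביקורת."
--
--
-- def verify_id(id_number):
--     """Single arithmetic pass over the digits instead of list/string building."""
--     if not id_number:
--         return ID_EMPTY
--     try:
--         id_number_str = str(int(id_number)).zfill(9)
--     except ValueError:
--         return ID_IS_NOT_A_NUMBER.format(value=id_number.__repr__())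
--
--     check_digit = int(id_number_str[-1])
--     total = 0
--     for i, ch in enumerate(id_number_str[:-1]):
--         d = int(ch)
--         if i % 2 == 1:
--             d *= 2
--             if d > 9:
--                 d -= 9
--         total += d
--
--     if check_digit != 10 - total % 10:
--         return ID_INVALID_CHECK_DIGIT.format(value=id_number_str.__repr__())
--
--     return ""
-- ===== Notes on version B (the rewrite author's own statement) =====
-- stated objective: simpler
-- what changed: Replaced A's slice-into-two-lists, doubling, string-join and per-character re-summation by a single arithmetic pass over the digits (double at odd indices, subtract 9 when the doubled digit exceeds 9, accumulate a running total).
import Mathlib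
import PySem

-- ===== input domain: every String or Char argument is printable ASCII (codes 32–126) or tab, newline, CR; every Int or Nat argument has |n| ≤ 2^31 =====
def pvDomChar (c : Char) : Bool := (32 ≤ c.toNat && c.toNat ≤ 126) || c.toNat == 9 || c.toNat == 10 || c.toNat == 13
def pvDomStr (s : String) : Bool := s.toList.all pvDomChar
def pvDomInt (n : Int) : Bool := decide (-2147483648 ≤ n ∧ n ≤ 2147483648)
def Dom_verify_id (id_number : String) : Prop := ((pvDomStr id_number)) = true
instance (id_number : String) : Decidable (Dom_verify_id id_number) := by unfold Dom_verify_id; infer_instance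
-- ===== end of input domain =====

-- B replaces A's slice/list/string-join digit summation by a single arithmetic pass over the
-- digits (double at odd indices, subtract 9 when > 9); objective: simpler, same asymptotic cost.

-- Shared builtins/constants (Python builtins int(c), repr(s) and the module's message constants,
-- used identically by both Pythons):

-- int(c) for a single character c (exact where it returns; 0 stands for the never-reached
-- ValueError default — both ports only apply it to decimal digits inside Pre_)
def pvIntChar (c : Char) : Int := (PySem.Int.ofChars? [c]).getD 0

-- s.__repr__() for printable-ASCII/tab/newline/CR strings (CPython's quote choice and escapes)
def pvRepr (s : List Char) : List Char :=
  let q : Char := if ('\'' ∈ s) && !('"' ∈ s) then '"' else '\''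
  q :: (s.flatMap (fun c =>
    if c = '\\' then ['\\', '\\']
    else if c = q then ['\\', q]
    else if c = '\t' then ['\\', 't']
    else if c = '\n' then ['\\', 'n']
    else if c = '\r' then ['\\', 'r']
    else [c])) ++ [q]

def ID_EMPTY : String := "שגיאה: שדה תעודת זהות ריק."

-- ID_IS_NOT_A_NUMBER.format(value=v)
def fmtNotANumber (v : List Char) : String :=
  String.ofList (" שגיאה: הערך ".toList ++ v ++ " אינו מספר תעודת זהות תקין.".toList)

-- ID_INVALID_CHECK_DIGIT.format(value=v)
def fmtInvalidCheck (v : List Char) : String :=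
  String.ofList ("שגיאה: הערך ".toList ++ v ++ " אינו מספר תעודת זהות תקין. טעות בספרת הביקורת.".toList)

-- ===== PORT A =====
def verify_id (id_number : String) : String :=
  if id_number.toList = [] then ID_EMPTY
  else
    match PySem.Int.ofStr? id_number with
    | none => fmtNotANumber (pvRepr id_number.toList)
    | some m =>
      let id_number_str := PySem.Chars.zfill (PySem.Int.toChars m) 9
      let orig_value := id_number_str
      let check_digit := pvIntChar ((PySem.List.pyGet? id_number_str (-1)).getD ' ')
      let id_number_str := PySem.List.slice id_number_str none (some (-1))
      let odd_placed_digits := ((PySem.List.slice? id_number_str none none 2).getD []).map pvIntChar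
      let even_placed_digits := ((PySem.List.slice? id_number_str (some 1) none 2).getD []).map pvIntChar
      let values := odd_placed_digits ++ even_placed_digits.map (fun i => 2 * i)
      let valuesS := (values.map PySem.Int.toChars).flatten
      let expected_check := 10 - PySem.Int.mod ((valuesS.map pvIntChar).sum) 10
      if check_digit ≠ expected_check then fmtInvalidCheck (pvRepr orig_value)
      else ""

-- ===== PORT B =====
def verify_id_alt (id_number : String) : String :=
  if id_number.toList = [] then ID_EMPTY
  else
    match PySem.Int.ofStr? id_number with
    | none => fmtNotANumber (pvRepr id_number.toList)
    | some m =>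
      let id_number_str := PySem.Chars.zfill (PySem.Int.toChars m) 9
      let check_digit := pvIntChar ((PySem.List.pyGet? id_number_str (-1)).getD ' ')
      let total := (PySem.List.enumerate (PySem.List.slice id_number_str none (some (-1))) 0).foldl
        (fun t p =>
          let d := pvIntChar p.2
          let d := if PySem.Int.mod p.1 2 = 1 then (if 9 < 2 * d then 2 * d - 9 else 2 * d) else d
          t + d) 0
      if check_digit ≠ 10 - PySem.Int.mod total 10 then fmtInvalidCheck (pvRepr id_number_str)
      else ""

-- ===== PRECONDITION & SPEC =====
-- Pre_ excludes exactly the strings that parse as a NEGATIVE int: there the zero-filled string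
-- starts with a minus sign and A raises an uncaught ValueError converting that sign character to
-- a digit in its comprehension (B raises the same way in its loop).
def Pre_verify_id (id_number : String) : Prop := 0 ≤ (PySem.Int.ofStr? id_number).getD 0
instance (id_number : String) : Decidable (Pre_verify_id id_number) := by unfold Pre_verify_id; infer_instance
def pvWitness_verify_id : String := "123456782"

def Spec_verify_id (id_number : String) (out : String) : Prop := out = verify_id_alt id_number
instance (id_number : String) (out : String) : Decidable (Spec_verify_id id_number out) := by unfold Spec_verify_id; infer_instance

-- ===== CLAIM (what is proved, stated in full; the proofs are below) =====
def Claim_equal_verify_id : Prop := ∀ (id_number : String), Dom_verify_id id_number → Pre_verify_id id_number → Spec_verify_id id_number (verify_id id_number)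

-- ===== LEMMAS AND PROOFS =====

def pvEvens {α : Type} : List α → List α
  | [] => []
  | [a] => [a]
  | a :: _ :: t => a :: pvEvens t

theorem pvFilterMap_range_evens {α : Type} (xs : List α) :
    (List.range ((xs.length + 1) / 2)).filterMap (fun k => xs[2 * k]?) = pvEvens xs := by
  induction xs using pvEvens.induct with
  | case1 => simp [pvEvens]
  | case2 a => simp [pvEvens]
  | case3 a b t ih =>
    have h2 : ((a :: b :: t).length + 1) / 2 = (t.length + 1) / 2 + 1 := by
      simp only [List.length_cons]; omega
    rw [pvEvens, h2, List.range_succ_eq_map, List.filterMap_cons, List.filterMap_map]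
    simp only [Function.comp_def]
    rw [show (fun k : Nat => (a :: b :: t)[2 * (k + 1)]?) = (fun k : Nat => t[2 * k]?) from
      funext fun k => by rw [show 2 * (k + 1) = 2 * k + 1 + 1 from by omega]; simp]
    rw [ih]
    simp

theorem pvSlice2_all {α : Type} (xs : List α) :
    PySem.List.slice? xs none none 2 = some (pvEvens xs) := by
  rw [← pvFilterMap_range_evens]
  unfold PySem.List.slice? PySem.List.sliceIndices
  norm_num
  rw [show (if 0 < xs.length then (((xs.length : Int) + 2 - 1) / 2).toNat else 0)
      = (xs.length + 1) / 2 from by split <;> omega]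
  rw [show (fun x : Nat => xs[((2 : Int) * (x : Nat)).toNat]?) = (fun k : Nat => xs[2 * k]?) from
    funext fun x => by rw [show ((2 : Int) * (x : Nat)).toNat = 2 * x from by omega]]

theorem pvSlice2_from1 {α : Type} (xs : List α) :
    PySem.List.slice? xs (some 1) none 2 = some (pvEvens xs.tail) := by
  unfold PySem.List.slice? PySem.List.sliceIndices
  norm_num
  cases xs with
  | nil => simp [pvEvens]
  | cons a t =>
    rw [← pvFilterMap_range_evens]
    rw [show (if 1 < (a :: t).length then
          ((((a :: t).length : Int) - min 1 ((a :: t).length : Int) + 2 - 1) / 2).toNat else 0)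
        = (t.length + 1) / 2 from by simp only [List.length_cons]; split <;> [skip; skip] <;> omega]
    rw [show (fun x : Nat => (a :: t)[(min 1 ((a :: t).length : Int) + 2 * (x : Nat)).toNat]?)
        = (fun k : Nat => t[2 * k]?) from funext fun x => by
      rw [show (min 1 ((a :: t).length : Int) + 2 * (x : Nat)).toNat = 2 * x + 1 from by
        simp only [List.length_cons]; omega]
      simp]
    simp


theorem pvEvens_subset {α : Type} (xs : List α) : ∀ c ∈ pvEvens xs, c ∈ xs := by
  induction xs using pvEvens.induct with
  | case1 => simp [pvEvens]
  | case2 a => simp [pvEvens]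
  | case3 a b t ih =>
    intro c hc
    rw [pvEvens] at hc
    rcases List.mem_cons.mp hc with h | h
    · simp [h]
    · simp [ih c h]

-- every character Nat.toDigitsCore 10 can emit is a decimal digit character
theorem pvToDigitsCore_mem (fuel : Nat) : ∀ (n : Nat) (ds : List Char),
    (∀ c ∈ ds, ∃ d : Nat, d ≤ 9 ∧ c = Nat.digitChar d) →
    ∀ c ∈ Nat.toDigitsCore 10 fuel n ds, ∃ d : Nat, d ≤ 9 ∧ c = Nat.digitChar d := by
  induction fuel with
  | zero => intro n ds h c hc; exact h c hc
  | succ f ih =>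
    intro n ds h c hc
    rw [Nat.toDigitsCore] at hc
    by_cases hz : n / 10 = 0
    · simp only [hz] at hc
      rcases List.mem_cons.mp hc with h1 | h1
      · exact ⟨n % 10, by omega, h1⟩
      · exact h c h1
    · simp only [if_neg hz] at hc
      refine ih (n / 10) _ ?_ c hc
      intro c2 hc2
      rcases List.mem_cons.mp hc2 with h1 | h1
      · exact ⟨n % 10, by omega, h1⟩
      · exact h c2 h1

theorem pvZfill_mem (cs : List Char) (w : Int) :
    ∀ c ∈ PySem.Chars.zfill cs w, c ∈ cs ∨ c = '0' := by
  intro c hc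
  unfold PySem.Chars.zfill at hc
  split at hc
  · exact Or.inl hc
  · split at hc
    · split at hc
      · rcases List.mem_cons.mp hc with h | h
        · exact Or.inl (by simp [h])
        · rcases List.mem_append.mp h with h1 | h1
          · exact Or.inr (List.eq_of_mem_replicate h1)
          · exact Or.inl (by simp [h1])
      · rcases List.mem_append.mp hc with h1 | h1
        · exact Or.inr (List.eq_of_mem_replicate h1)
        · exact Or.inl h1
    · exact Or.inr (List.eq_of_mem_replicate hc)

theorem pvDigits_of_idstr (m : Int) (hm : 0 ≤ m) :
    ∀ c ∈ PySem.Chars.zfill (PySem.Int.toChars m) 9, ∃ d : Nat, d ≤ 9 ∧ c = Nat.digitChar d := by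
  intro c hc
  rcases pvZfill_mem _ _ c hc with h | h
  · rw [PySem.Int.toChars, if_neg (by omega)] at h
    exact pvToDigitsCore_mem _ _ _ (by simp) c h
  · exact ⟨0, by omega, by rw [h]; rfl⟩

theorem pvIntChar_digitChar (d : Nat) (hd : d ≤ 9) : pvIntChar (Nat.digitChar d) = (d : Int) := by
  interval_cases d <;> decide

-- digit sum of str(v) for 0 ≤ v ≤ 18 (the double-digit case drops 9)
theorem pvDSum_small (v : Int) (h0 : 0 ≤ v) (h1 : v ≤ 18) :
    ((PySem.Int.toChars v).map pvIntChar).sum = if 9 < v then v - 9 else v := by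
  interval_cases v <;> decide

-- the interleaved Luhn-style sum B computes
def pvISum : List Char → Bool → Int
  | [], _ => 0
  | c :: t, b =>
    (if b then (if 9 < 2 * pvIntChar c then 2 * pvIntChar c - 9 else 2 * pvIntChar c)
     else pvIntChar c) + pvISum t (!b)

theorem pvFoldl_enum (ds : List Char) : ∀ (s t : Int),
    (PySem.List.enumerate ds s).foldl
      (fun t p => t +
        if PySem.Int.mod p.1 2 = 1
        then (if 9 < 2 * pvIntChar p.2 then 2 * pvIntChar p.2 - 9 else 2 * pvIntChar p.2)
        else pvIntChar p.2) t
    = t + pvISum ds (decide (PySem.Int.mod s 2 = 1)) := by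
  induction ds with
  | nil => intro s t; simp [pvISum]
  | cons c ds ih =>
    intro s t
    rw [PySem.List.enumerate_cons, List.foldl_cons, ih]
    have e : ∀ x : Int, PySem.Int.mod x 2 = x % 2 := fun x =>
      PySem.Int.mod_eq_emod_of_pos (by norm_num)
    by_cases hb : PySem.Int.mod s 2 = 1
    · have h1 : decide (PySem.Int.mod s 2 = 1) = true := decide_eq_true hb
      have h2 : decide (PySem.Int.mod (s + 1) 2 = 1) = false := by
        apply decide_eq_false
        rw [e] at hb ⊢
        omega
      rw [h1, h2]
      show (t + (if PySem.Int.mod s 2 = 1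
          then (if 9 < 2 * pvIntChar c then 2 * pvIntChar c - 9 else 2 * pvIntChar c)
          else pvIntChar c)) + pvISum ds false
        = t + ((if true then (if 9 < 2 * pvIntChar c then 2 * pvIntChar c - 9 else 2 * pvIntChar c)
            else pvIntChar c) + pvISum ds (!true))
      rw [if_pos hb, if_pos rfl, Bool.not_true, add_assoc]
    · have h1 : decide (PySem.Int.mod s 2 = 1) = false := decide_eq_false hb
      have h2 : decide (PySem.Int.mod (s + 1) 2 = 1) = true := by
        apply decide_eq_true
        rw [e] at hb ⊢
        omega
      rw [h1, h2]
      show (t + (if PySem.Int.mod s 2 = 1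
          then (if 9 < 2 * pvIntChar c then 2 * pvIntChar c - 9 else 2 * pvIntChar c)
          else pvIntChar c)) + pvISum ds true
        = t + ((if false then (if 9 < 2 * pvIntChar c then 2 * pvIntChar c - 9 else 2 * pvIntChar c)
            else pvIntChar c) + pvISum ds (!false))
      rw [if_neg hb, if_neg (by simp), Bool.not_false, add_assoc]

theorem pvSplit_sum (ds : List Char) :
    ((pvEvens ds).map pvIntChar).sum
      + (((pvEvens ds.tail).map pvIntChar).map (fun v => if 9 < 2 * v then 2 * v - 9 else 2 * v)).sum
    = pvISum ds false := by
  induction ds using pvEvens.induct with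
  | case1 => simp [pvEvens, pvISum]
  | case2 a => simp [pvEvens, pvISum]
  | case3 a b t ih =>
    show ((pvEvens (a :: b :: t)).map pvIntChar).sum
      + (((pvEvens (b :: t)).map pvIntChar).map _).sum = _
    rw [pvEvens, show pvEvens (b :: t) = b :: pvEvens t.tail from by
      cases t <;> rfl]
    simp only [List.map_cons, List.sum_cons, pvISum, Bool.not_false, Bool.not_true]
    rw [← ih]
    norm_num
    ring


-- A-side sum: digit-sum of the joined string of values equals the interleaved one-pass sum
theorem pvASum (ds : List Char) (hd : ∀ c ∈ ds, ∃ d : Nat, d ≤ 9 ∧ c = Nat.digitChar d) :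
    (List.map pvIntChar (List.map PySem.Int.toChars
      (List.map pvIntChar (pvEvens ds)
        ++ List.map (fun i => 2 * i) (List.map pvIntChar (pvEvens ds.tail)))).flatten).sum
    = pvISum ds false := by
  simp only [List.map_flatten, List.sum_flatten, List.map_map, List.map_append, List.sum_append,
    Function.comp_def]
  have e1 : ∀ c ∈ pvEvens ds,
      ((PySem.Int.toChars (pvIntChar c)).map pvIntChar).sum = pvIntChar c := by
    intro c hc
    obtain ⟨d, hd9, rfl⟩ := hd c (pvEvens_subset _ c hc)
    rw [pvIntChar_digitChar d hd9,
      pvDSum_small _ (by exact_mod_cast Nat.zero_le d) (by exact_mod_cast by omega),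
      if_neg (by exact_mod_cast by omega)]
  have e2 : ∀ c ∈ pvEvens ds.tail,
      ((PySem.Int.toChars (2 * pvIntChar c)).map pvIntChar).sum
        = (if 9 < 2 * pvIntChar c then 2 * pvIntChar c - 9 else 2 * pvIntChar c) := by
    intro c hc
    obtain ⟨d, hd9, rfl⟩ := hd c (List.mem_of_mem_tail (pvEvens_subset _ c hc))
    rw [pvIntChar_digitChar d hd9,
      pvDSum_small _ (by exact_mod_cast Nat.zero_le (2 * d)) (by exact_mod_cast by omega)]
  rw [List.map_congr_left e1, List.map_congr_left e2, ← pvSplit_sum ds, List.map_map]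
  rfl

-- ===== VERDICT (by name: the statement is the Claim_ definition above) =====
theorem verify_id_spec : Claim_equal_verify_id := by
  intro s hdom hpre
  unfold Spec_verify_id verify_id verify_id_alt
  by_cases hs : s.toList = []
  · simp [hs]
  · simp only [if_neg hs]
    cases h : PySem.Int.ofStr? s with
    | none => rfl
    | some m =>
      have hm : 0 ≤ m := by
        unfold Pre_verify_id at hpre
        rw [h] at hpre
        simpa using hpre
      simp only [PySem.List.slice_to_neg_one, pvSlice2_all, pvSlice2_from1, Option.getD_some]
      have hds : ∀ c ∈ (PySem.Chars.zfill (PySem.Int.toChars m) 9).dropLast,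
          ∃ d : Nat, d ≤ 9 ∧ c = Nat.digitChar d :=
        fun c hc => pvDigits_of_idstr m hm c (List.dropLast_subset _ hc)
      rw [pvASum _ hds, pvFoldl_enum _ 0 0,
        show (decide (PySem.Int.mod 0 2 = 1)) = false from by decide, zero_add]
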